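-- pv_equiv track=rewrite | github.com/BehroozMansouri/TangentCFT | tangenttofasttext_value.py | get_char_value
-- ===== SOURCE A (Python) =====
-- def get_char_value(lst, node_char_map, node_char_id):
--     """
--     This method handles the char assigning process, taken a list of tokens to assign char value to them, this assigning
--     is done by the map
--     node_char_id show the id that can be given at the moment to the unseen tokens
--     :param lst: list of token that are going to be converted to char values
--     :param node_char_map: map that will be used for previously seen token to which a char is assigned
--     :param node_char_id: id that will be used for new unseen tokens
--     :return: return the converted values along with the new id (in the case it is updated from assigning new char to an
--      unseen token
--     """
--     converted_value = ""
--     for item in lst: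
--         if item in node_char_map:
--             value = node_char_map.get(item)
--         else:
--             node_char_map[item] = chr(node_char_id)
--             value = chr(node_char_id)
--             node_char_id = node_char_id + 1
--         converted_value += value
--     return converted_value, node_char_id
-- ===== SOURCE B (Python) =====
-- def get_char_value(lst, node_char_map, node_char_id):
--     # Two-pass decomposition: first populate the map with chars for every
--     # unseen token (advancing node_char_id), then emit the output by a
--     # single join over the fully populated map.
--     for item in lst:
--         if item not in node_char_map:
--             node_char_map[item] = chr(node_char_id)
--             node_char_id += 1
--     converted_value = "".join(node_char_map[item] for item in lst)
--     return converted_value, node_char_id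
-- ===== Notes on version B (the rewrite author's own statement) =====
-- stated objective: alternative
-- what changed: B splits A's fused loop into two passes: a first pass that only populates node_char_map with chars for unseen tokens (advancing the id), then a join over the list through the fully built map to produce the output string.
-- outside the precondition, e.g. on get_char_value(['a'], {}, -1): A raises ValueError, B raises ValueError
import Mathlib
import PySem

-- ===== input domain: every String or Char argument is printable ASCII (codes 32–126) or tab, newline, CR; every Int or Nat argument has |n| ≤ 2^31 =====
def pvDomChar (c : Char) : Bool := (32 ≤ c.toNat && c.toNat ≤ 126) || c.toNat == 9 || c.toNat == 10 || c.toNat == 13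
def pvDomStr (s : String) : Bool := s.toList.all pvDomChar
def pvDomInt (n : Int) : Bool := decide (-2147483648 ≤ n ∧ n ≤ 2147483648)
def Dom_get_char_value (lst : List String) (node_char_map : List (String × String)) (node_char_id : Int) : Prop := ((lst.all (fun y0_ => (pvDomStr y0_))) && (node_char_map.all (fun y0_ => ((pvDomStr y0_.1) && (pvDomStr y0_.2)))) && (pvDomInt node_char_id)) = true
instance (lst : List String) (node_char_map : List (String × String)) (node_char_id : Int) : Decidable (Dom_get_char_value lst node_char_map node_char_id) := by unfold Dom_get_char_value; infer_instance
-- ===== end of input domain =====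

-- B separates table-building from output generation (two passes instead of one fused loop);
-- objective: alternative decomposition, not faster. Both A and B mutate node_char_map in place
-- identically in Python; the equivalence proved here is about the RETURN value.

-- ===== PORT A =====
-- chr(n) ported as Char.ofNat n.toNat: exact for 0 ≤ n and n a valid (non-surrogate) code point,
-- which Pre_get_char_value guarantees for every id A feeds to chr.
def get_char_value (lst : List String) (node_char_map : List (String × String)) (node_char_id : Int) : String × Int :=
  let st := lst.foldl
    (fun (st : List Char × PySem.Dict String String × Int) item =>
      let conv := st.1; let m := st.2.1; let id := st.2.2
      if m.contains item then
        -- value = node_char_map.get(item): present, so .get returns the stored value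
        (conv ++ ((m.get? item).getD "").toList, m, id)
      else
        let c := Char.ofNat id.toNat
        (conv ++ [c], m.insert item (String.ofList [c]), id + 1))
    ([], PySem.Dict.ofList node_char_map, node_char_id)
  (String.ofList st.1, st.2.2)

-- ===== PORT B =====
-- first pass of Source B: assign a fresh char to every unseen token, advancing the id
def pvBuildMap : List String → PySem.Dict String String → Int → PySem.Dict String String × Int
  | [], m, id => (m, id)
  | item :: rest, m, id =>
      if m.contains item then pvBuildMap rest m id
      else pvBuildMap rest (m.insert item (String.ofList [Char.ofNat id.toNat])) (id + 1)

def get_char_value_alt (lst : List String) (node_char_map : List (String × String)) (node_char_id : Int) : String × Int :=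
  let st := pvBuildMap lst (PySem.Dict.ofList node_char_map) node_char_id
  -- node_char_map[item] cannot miss after the first pass; the "" default is never used
  (PySem.Str.join "" (lst.map (fun item => (st.1.get? item).getD "")), st.2)

-- ===== PRECONDITION & SPEC =====
-- Pre_ excludes exactly the inputs on which Python A either raises ValueError (chr called with an id
-- outside [0, 0x110000)) or returns a string containing a lone surrogate (a new char code in
-- 0xD800–0xDFFF), which is not a value representable by Lean's Char/String; B behaves like A there.
def Pre_get_char_value (lst : List String) (node_char_map : List (String × String)) (node_char_id : Int) : Prop :=
  let keys := node_char_map.map Prod.fst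
  let fresh := (PySem.List.dedup lst).filter (fun s => !(keys.contains s))
  fresh = [] ∨ (0 ≤ node_char_id ∧ node_char_id + fresh.length ≤ 1114112 ∧
                (node_char_id + fresh.length ≤ 55296 ∨ 57344 ≤ node_char_id))
instance (lst : List String) (node_char_map : List (String × String)) (node_char_id : Int) : Decidable (Pre_get_char_value lst node_char_map node_char_id) := by unfold Pre_get_char_value; infer_instance
def pvWitness_get_char_value : List String × (List (String × String)) × Int := (["x", "y", "x"], [("y", "Q")], 65)

def Spec_get_char_value (lst : List String) (node_char_map : List (String × String)) (node_char_id : Int) (out : String × Int) : Prop := out = get_char_value_alt lst node_char_map node_char_id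
instance (lst : List String) (node_char_map : List (String × String)) (node_char_id : Int) (out : String × Int) : Decidable (Spec_get_char_value lst node_char_map node_char_id out) := by unfold Spec_get_char_value; infer_instance

-- ===== CLAIM (what is proved, stated in full; the proofs are below) =====
def Claim_equal_get_char_value : Prop := ∀ (lst : List String) (node_char_map : List (String × String)) (node_char_id : Int), Dom_get_char_value lst node_char_map node_char_id → Pre_get_char_value lst node_char_map node_char_id → Spec_get_char_value lst node_char_map node_char_id (get_char_value lst node_char_map node_char_id)

-- ===== LEMMAS AND PROOFS =====

-- the first pass only inserts unseen keys, so an existing binding survives it unchanged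
theorem pvBuildMap_get?_of_contains (l : List String) (m : PySem.Dict String String) (id : Int)
    (k : String) (h : m.contains k = true) :
    (pvBuildMap l m id).1.get? k = m.get? k := by
  induction l generalizing m id with
  | nil => rfl
  | cons item rest ih =>
    by_cases hc : m.contains item = true
    · simp only [pvBuildMap, if_pos hc]
      exact ih m id h
    · have hne : k ≠ item := by intro e; rw [e] at h; exact hc h
      simp only [pvBuildMap, if_neg hc]
      rw [ih _ _ (by simp [PySem.Dict.contains_insert, h]),
          PySem.Dict.get?_insert, if_neg hne]

-- the fused loop of A, run from any accumulator, yields the accumulator followed by the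
-- second-pass rendering of lst through the fully built map, together with that map and final id
theorem pvLoop_eq (lst : List String) (m : PySem.Dict String String) (id : Int) (acc : List Char) :
    lst.foldl
      (fun (st : List Char × PySem.Dict String String × Int) item =>
        let conv := st.1; let m := st.2.1; let id := st.2.2
        if m.contains item then
          (conv ++ ((m.get? item).getD "").toList, m, id)
        else
          let c := Char.ofNat id.toNat
          (conv ++ [c], m.insert item (String.ofList [c]), id + 1))
      (acc, m, id)
    = (acc ++ (lst.map (fun it => (((pvBuildMap lst m id).1.get? it).getD "").toList)).flatten,
       pvBuildMap lst m id) := by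
  induction lst generalizing m id acc with
  | nil => simp [pvBuildMap]
  | cons item rest ih =>
    by_cases hc : m.contains item = true
    · have hm : (pvBuildMap rest m id).1.get? item = m.get? item :=
        pvBuildMap_get?_of_contains rest m id item hc
      simp only [List.foldl_cons, pvBuildMap, if_pos hc]
      rw [ih]
      simp [hm, List.append_assoc]
    · have hc' : (m.insert item (String.ofList [Char.ofNat id.toNat])).contains item = true :=
        PySem.Dict.contains_insert_self _ _ _
      have hm : (pvBuildMap rest (m.insert item (String.ofList [Char.ofNat id.toNat])) (id + 1)).1.get? item
          = some (String.ofList [Char.ofNat id.toNat]) := by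
        rw [pvBuildMap_get?_of_contains _ _ _ _ hc', PySem.Dict.get?_insert_self]
      simp only [List.foldl_cons, pvBuildMap, if_neg hc]
      rw [ih]
      simp [hm, List.append_assoc]

-- "".join over List Char: empty separator means flatten
theorem pv_intercalate_nil (l : List (List Char)) : [].intercalate l = l.flatten := by
  induction l with
  | nil => rfl
  | cons x xs ih => cases xs <;> simp_all [List.intercalate, List.intersperse]

-- ===== VERDICT (by name: the statement is the Claim_ definition above) =====
theorem get_char_value_spec : Claim_equal_get_char_value := by
  intro lst ncm id _ _
  unfold Spec_get_char_value get_char_value get_char_value_alt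
  rw [pvLoop_eq]
  refine Prod.ext ?_ rfl
  apply String.ext
  simp [PySem.Str.join, PySem.Chars.join, pv_intercalate_nil, List.map_map, Function.comp_def]
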